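-- pv_equiv track=rewrite | github.com/Avadhoot5/basic_dsa | 01_Basics_DSA/TUF/03_Array/easy/practice_Array.py | findNumBetter
-- ===== SOURCE A (Python) =====
-- def findNumBetter(arr):
--     hashMap = {}
--
--     for i in arr:
--         hashMap[i] = hashMap.get(i, 0) + 1
--
--     for i in arr:
--         if (hashMap[i] == 1):
--             return i
--
--     return -1
-- ===== SOURCE B (Python) =====
-- def findNumBetter(arr):
--     # peel-and-filter: the head of the remaining list is unique in the whole
--     # array iff it does not reappear in the rest (it is a first occurrence);
--     # otherwise drop every occurrence of it and continue with what is left.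
--     while arr:
--         head, tail = arr[0], arr[1:]
--         if head not in tail:
--             return head
--         arr = [x for x in tail if x != head]
--     return -1
-- ===== Notes on version B (the rewrite author's own statement) =====
-- stated objective: alternative
-- what changed: B maintains no frequency map at all: it repeatedly peels the head of the remaining list, returns it if it does not reappear in the rest, and otherwise filters out all its occurrences and continues on the shrunken list.
import Mathlib
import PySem

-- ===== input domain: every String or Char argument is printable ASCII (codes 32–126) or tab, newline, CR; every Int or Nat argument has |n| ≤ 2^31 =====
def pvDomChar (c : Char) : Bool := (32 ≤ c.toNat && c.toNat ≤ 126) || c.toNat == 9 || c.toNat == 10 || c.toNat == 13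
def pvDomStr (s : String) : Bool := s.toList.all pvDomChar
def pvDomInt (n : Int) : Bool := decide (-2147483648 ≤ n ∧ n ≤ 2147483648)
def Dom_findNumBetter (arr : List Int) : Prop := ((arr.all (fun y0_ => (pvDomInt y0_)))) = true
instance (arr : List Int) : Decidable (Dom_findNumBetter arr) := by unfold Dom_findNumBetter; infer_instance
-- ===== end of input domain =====

-- B replaces A's frequency hash map by peel-and-filter: return the head if it does not
-- reappear in the rest, else delete all its occurrences and continue (objective: alternative).

-- ===== PORT A =====
-- second loop of A: return the first i in rest with hashMap[i] == 1
-- (hashMap[i] is exact as getD here: every element of arr was inserted by the first loop)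
def findNumBetterScan (d : PySem.Dict Int Int) : List Int → Int
  | [] => -1
  | i :: rest => if d.getD i 0 = 1 then i else findNumBetterScan d rest

def findNumBetter (arr : List Int) : Int :=
  let hashMap := arr.foldl (fun d i => d.insert i (d.getD i 0 + 1)) PySem.Dict.empty
  findNumBetterScan hashMap arr

-- ===== PORT B =====
-- B: while arr: head, tail = arr[0], arr[1:]; if head not in tail: return head;
--    arr = [x for x in tail if x != head];  return -1
def findNumBetter_alt (arr : List Int) : Int :=
  match arr with
  | [] => -1
  | head :: tail =>
    if head ∉ tail then head
    else findNumBetter_alt (tail.filter (fun x => x ≠ head))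
termination_by arr.length
decreasing_by
  have h := List.length_filter_le (fun x : {x // x ∈ tail} => decide (x.1 ≠ head)) tail.attach
  simp at h ⊢
  omega

-- ===== PRECONDITION & SPEC =====
def Spec_findNumBetter (arr : List Int) (out : Int) : Prop := out = findNumBetter_alt arr
instance (arr : List Int) (out : Int) : Decidable (Spec_findNumBetter arr out) := by unfold Spec_findNumBetter; infer_instance

-- ===== CLAIM (what is proved, stated in full; the proofs are below) =====
def Claim_equal_findNumBetter : Prop := ∀ (arr : List Int), Dom_findNumBetter arr → Spec_findNumBetter arr (findNumBetter arr)

-- ===== LEMMAS AND PROOFS =====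

-- reference form: first element of `rest` occurring exactly once in `full`, else -1
def firstOnce (full : List Int) : List Int → Int
  | [] => -1
  | y :: r => if full.count y = 1 then y else firstOnce full r

theorem scanA_eq (arr rest : List Int) :
    findNumBetterScan (arr.foldl (fun d i => d.insert i (d.getD i 0 + 1)) PySem.Dict.empty) rest
      = firstOnce arr rest := by
  induction rest with
  | nil => rfl
  | cons i rest ih =>
    simp only [findNumBetterScan, firstOnce,
      PySem.Dict.getD_foldl_insert_add_one, PySem.Dict.getD_empty, ih]
    by_cases h : arr.count i = 1
    · simp [h]
    · have h' : ¬ ((0 : Int) + (arr.count i : Int) = 1) := by omega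
      simp only [h, h', if_false]

-- replacing the frequency reference `full` by `rest` and filtering out `head` from the
-- scanned list changes nothing when `head` is not exactly-once and other counts agree
theorem firstOnce_filter (head : Int) (full rest : List Int)
    (hh : full.count head ≠ 1) (hc : ∀ x, x ≠ head → full.count x = rest.count x) :
    ∀ l : List Int, firstOnce full l = firstOnce rest (l.filter (fun x => x ≠ head)) := by
  intro l
  induction l with
  | nil => rfl
  | cons y r ih =>
    by_cases hy : y = head
    · subst hy
      rw [List.filter_cons_of_neg (by simp), firstOnce, if_neg hh, ih]
    · rw [List.filter_cons_of_pos (by simp [hy])]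
      have hcy : rest.count y = full.count y := (hc y hy).symm
      by_cases h1 : full.count y = 1
      · rw [firstOnce, if_pos h1, firstOnce, if_pos (hcy.trans h1)]
      · rw [firstOnce, if_neg h1, firstOnce, if_neg (fun h2 => h1 (hcy ▸ h2)), ih]

theorem altB_eq_aux (n : Nat) : ∀ arr : List Int, arr.length ≤ n →
    findNumBetter_alt arr = firstOnce arr arr := by
  induction n with
  | zero =>
    intro arr h
    have : arr = [] := List.eq_nil_of_length_eq_zero (Nat.le_zero.mp h)
    subst this; rw [findNumBetter_alt]; rfl
  | succ n ih =>
    intro arr h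
    match arr with
    | [] => rw [findNumBetter_alt]; rfl
    | head :: tail =>
      rw [findNumBetter_alt]
      by_cases hmem : head ∈ tail
      · simp only [hmem, not_true_eq_false, if_false]
        have hpos : 0 < tail.count head := List.count_pos_iff.mpr hmem
        have hh : (head :: tail).count head ≠ 1 := by
          rw [List.count_cons_self]; omega
        have hc : ∀ x, x ≠ head →
            (head :: tail).count x = (tail.filter (fun x => x ≠ head)).count x := by
          intro x hx
          rw [List.count_cons_of_ne (Ne.symm hx)]
          exact (List.count_filter (by simp [hx])).symm
        have hlen : (tail.filter (fun x => x ≠ head)).length ≤ n := by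
          have := List.length_filter_le (fun x => decide (x ≠ head)) tail
          simp only [List.length_cons] at h; omega
        rw [ih _ hlen, firstOnce, if_neg hh]
        exact (firstOnce_filter head (head :: tail) _ hh hc tail).symm
      · have h1 : (head :: tail).count head = 1 := by
          rw [List.count_cons_self, List.count_eq_zero_of_not_mem hmem]
        simp only [hmem, not_false_eq_true, firstOnce, h1, if_pos]

theorem altB_eq (arr : List Int) : findNumBetter_alt arr = firstOnce arr arr :=
  altB_eq_aux arr.length arr (Nat.le_refl _)

-- ===== VERDICT (by name: the statement is the Claim_ definition above) =====
theorem findNumBetter_spec : Claim_equal_findNumBetter := by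
  intro arr _
  unfold Spec_findNumBetter findNumBetter
  rw [scanA_eq, altB_eq]
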